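-- pv_equiv track=rewrite | github.com/cogent3/cogent3 | src/cogent3/recalculation/scope.py | _indexed
-- ===== SOURCE A (Python) =====
-- def _indexed(values):
--     # This is the core of the redundancy elimination, used to group
--     # identical calculations.
--     # >>> _indexed({'a':1.0, 'b':2.0, 'c':3.0, 'd':1.0, 'e':1.0})
--     # ([1.0, 2.0, 3.0], {'a':0, 'b':1, 'c':2, 'd':0, 'e':0})
--     uniq = []
--     index = {}
--     values = list(values.items())
--     values.sort()
--     for (key, value) in values:
--         if value in uniq:
--             u = uniq.index(value)
--         else:
--             u = len(uniq)
--             uniq.append(value)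
--         index[key] = u
--     return uniq, index
-- ===== SOURCE B (Python) =====
-- def _indexed(values):
--     # Invert the mapping: group the keys by value, order the groups by their
--     # smallest key (= the value's first appearance in sorted-key order), then
--     # index every key through its value's group rank.
--     groups = {}
--     for key, value in values.items():
--         groups.setdefault(value, []).append(key)
--     uniq = sorted(groups, key=lambda v: min(groups[v]))
--     rank = {v: u for u, v in enumerate(uniq)}
--     index = {key: rank[values[key]] for key in sorted(values)}
--     return uniq, index
-- ===== Notes on version B (the rewrite author's own statement) =====
-- stated objective: alternative
-- what changed: A sorts the items and grows uniq in one scan with a linear membership test and uniq.index pass per item; B never scans a growing list: it inverts the dict into value->keys groups, orders the groups by their smallest key (provably the value's first appearance in sorted-key order), and indexes each key through its value's group rank.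
import Mathlib
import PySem

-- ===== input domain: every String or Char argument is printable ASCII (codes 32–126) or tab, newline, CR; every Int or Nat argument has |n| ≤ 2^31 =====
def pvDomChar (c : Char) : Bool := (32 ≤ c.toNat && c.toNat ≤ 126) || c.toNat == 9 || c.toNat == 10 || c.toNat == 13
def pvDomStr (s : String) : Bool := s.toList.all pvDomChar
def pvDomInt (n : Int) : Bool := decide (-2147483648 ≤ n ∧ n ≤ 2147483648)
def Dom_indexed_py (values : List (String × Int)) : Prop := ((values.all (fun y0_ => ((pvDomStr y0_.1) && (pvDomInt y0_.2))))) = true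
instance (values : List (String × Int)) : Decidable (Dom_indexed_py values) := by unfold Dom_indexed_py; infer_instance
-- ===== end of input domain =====

-- B inverts the mapping instead of scanning a growing uniq list: it groups the keys by
-- value, orders the groups by their smallest key, and indexes each key through its
-- value's group rank. Return value only: A sorts a local copy of values.items().

-- ===== PORT A =====
-- loop body of A: 'if value in uniq: u = uniq.index(value) else: u = len(uniq); uniq.append(value)'; then 'index[key] = u'
def pvStepA (st : List Int × PySem.Dict String Int) (kv : String × Int) :
    List Int × PySem.Dict String Int :=
  match PySem.List.index? st.1 kv.2 with
  | some u => (st.1, st.2.insert kv.1 (u : Int))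
  | none   => (st.1 ++ [kv.2], st.2.insert kv.1 (PySem.List.len st.1))

def indexed_py (values : List (String × Int)) : List Int × (List (String × Int)) :=
  let vs := PySem.List.sorted2 values (fun kv => kv.1) (fun kv => kv.2)
  let r := vs.foldl pvStepA ([], PySem.Dict.empty)
  (r.1, r.2.items)

-- ===== PORT B =====
def indexed_py_alt (values : List (String × Int)) : List Int × (List (String × Int)) :=
  -- groups.setdefault(value, []).append(key) = modify value [] (· ++ [key])
  let groups := values.foldl
    (fun (d : PySem.Dict Int (List String)) kv => d.modify kv.2 [] (fun ks => ks ++ [kv.1]))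
    PySem.Dict.empty
  -- min(groups[v]): every group is nonempty, so Python's min never raises; getD defaults are never read
  let uniq := PySem.List.sorted groups.keys
    (fun v => (PySem.List.min? (groups.getD v []) (fun k => k)).getD "")
  let rank := (PySem.List.enumerate uniq).foldl
    (fun (d : PySem.Dict Int Int) uv => d.insert uv.2 uv.1) PySem.Dict.empty
  -- rank[values[key]] over key in sorted(values): every key is in values and its value in rank
  let dv := PySem.Dict.ofList values
  let index := (PySem.List.sorted (values.map Prod.fst) (fun k => k)).foldl
    (fun (d : PySem.Dict String Int) k => d.insert k (rank.getD (dv.getD k 0) 0)) PySem.Dict.empty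
  (uniq, index.items)

-- ===== PRECONDITION & SPEC =====
-- Pre_ excludes association lists with a repeated key: A's argument is a Python dict, whose
-- item list can never repeat a key, so such lists represent no input of A.
def Pre_indexed_py (values : List (String × Int)) : Prop := (values.map Prod.fst).Nodup
instance (values : List (String × Int)) : Decidable (Pre_indexed_py values) := by
  unfold Pre_indexed_py; infer_instance

def pvWitness_indexed_py : (List (String × Int)) := [("b", 1), ("a", 2), ("c", 1)]

def Spec_indexed_py (values : List (String × Int)) (out : List Int × (List (String × Int))) : Prop := out = indexed_py_alt values
instance (values : List (String × Int)) (out : List Int × (List (String × Int))) : Decidable (Spec_indexed_py values out) := by unfold Spec_indexed_py; infer_instance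

-- ===== CLAIM (what is proved, stated in full; the proofs are below) =====
def Claim_equal_indexed_py : Prop := ∀ (values : List (String × Int)), Dom_indexed_py values → Pre_indexed_py values → Spec_indexed_py values (indexed_py values)

-- ===== LEMMAS AND PROOFS =====

-- ---- generic: sorting with comparators that agree on the list's elements ----
lemma pvInsertBy_congr {α : Type} (b1 b2 : α → α → Bool) (x : α) (ys : List α)
    (h : ∀ y ∈ ys, b1 x y = b2 x y) : PySem.List.insertBy b1 x ys = PySem.List.insertBy b2 x ys := by
  induction ys with
  | nil => rfl
  | cons y t ih =>
    simp only [PySem.List.insertBy, h y (by simp)]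
    split <;> simp_all

lemma pvFoldl_insertBy_congr {α : Type} (b1 b2 : α → α → Bool) (L : List α)
    (h : ∀ a ∈ L, ∀ c ∈ L, b1 a c = b2 a c) (l acc : List α)
    (hl : ∀ x ∈ l, x ∈ L) (hacc : ∀ y ∈ acc, y ∈ L) :
    l.foldl (fun acc x => PySem.List.insertBy b1 x acc) acc
      = l.foldl (fun acc x => PySem.List.insertBy b2 x acc) acc := by
  induction l generalizing acc with
  | nil => rfl
  | cons x t ih =>
    have hx : x ∈ L := hl x (by simp)
    have h1 : PySem.List.insertBy b1 x acc = PySem.List.insertBy b2 x acc :=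
      pvInsertBy_congr _ _ _ _ (fun y hy => h x hx y (hacc y hy))
    simp only [List.foldl_cons, h1]
    exact ih _ (fun z hz => hl z (by simp [hz]))
      (fun y hy => by
        rcases (PySem.List.mem_insertBy b2 x y acc).mp hy with rfl | hy'
        · exact hx
        · exact hacc y hy')

-- with no repeated key, A's tuple sort is the sort by key alone
lemma pvSorted2_eq (values : List (String × Int)) (h : (values.map Prod.fst).Nodup) :
    PySem.List.sorted2 values (fun kv => kv.1) (fun kv => kv.2)
      = PySem.List.sorted values (fun kv => kv.1) := by
  show values.foldl (fun acc x => PySem.List.insertBy _ x acc) []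
      = values.foldl (fun acc x => PySem.List.insertBy _ x acc) []
  apply pvFoldl_insertBy_congr _ _ values _ values [] (fun x hx => hx) (by simp)
  intro a ha c hc
  by_cases hac : a = c
  · subst hac; simp
  · have hne : a.1 ≠ c.1 := fun he => hac (List.inj_on_of_nodup_map h ha hc he)
    rcases lt_or_gt_of_ne hne with hlt | hgt
    · simp [hlt, not_lt.mpr (le_of_lt hlt)]
    · simp [hgt, not_lt.mpr (le_of_lt hgt)]

-- the sorted item list has strictly increasing keys
lemma pvSortedStrict (values : List (String × Int)) (h : (values.map Prod.fst).Nodup) :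
    (PySem.List.sorted values (fun kv => kv.1)).Pairwise (fun a b => a.1 < b.1) := by
  have hp := PySem.List.sorted_pairwise values (fun kv => kv.1)
  have hperm : (PySem.List.sorted values (fun kv => kv.1)).Perm values :=
    PySem.List.sorted_perm values (fun kv => kv.1) false
  have hnd : ((PySem.List.sorted values (fun kv => kv.1)).map Prod.fst).Nodup :=
    (hperm.map Prod.fst).nodup_iff.mpr h
  have hne : (PySem.List.sorted values (fun kv => kv.1)).Pairwise (fun a b => a.1 ≠ b.1) :=
    (List.pairwise_map.mp hnd)
  exact (hp.and hne).imp (fun ⟨hle, hne⟩ => lt_of_le_of_ne hle hne)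

-- ---- A-side characterisation (uniq grows on first sight, index records positions) ----
def pvExtU (uniq : List Int) (s : List (String × Int)) : List Int :=
  s.foldl (fun u kv => if kv.2 ∈ u then u else u ++ [kv.2]) uniq

lemma pvExtU_prefix (s : List (String × Int)) (u : List Int) :
    ∃ t, pvExtU u s = u ++ t := by
  induction s generalizing u with
  | nil => exact ⟨[], by simp [pvExtU]⟩
  | cons kv t ih =>
    simp only [pvExtU, List.foldl_cons] at *
    by_cases h : kv.2 ∈ u
    · simpa [h] using ih u
    · obtain ⟨w, hw⟩ := ih (u ++ [kv.2])
      exact ⟨kv.2 :: w, by simp [h, hw]⟩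

lemma pvExtU_idxOf (s : List (String × Int)) (u : List Int) {v : Int} (hv : v ∈ u) :
    List.idxOf v (pvExtU u s) = List.idxOf v u := by
  obtain ⟨t, ht⟩ := pvExtU_prefix s u
  rw [ht, List.idxOf_append, if_pos hv]

lemma pvFoldA (s : List (String × Int)) (u : List Int) (d : PySem.Dict String Int)
    (hk : (s.map Prod.fst).Nodup) (hd : ∀ kv ∈ s, d.contains kv.1 = false) :
    (s.foldl pvStepA (u, d)).1 = pvExtU u s ∧
    (s.foldl pvStepA (u, d)).2.items =
      d.items ++ s.map (fun kv => (kv.1, (List.idxOf kv.2 (pvExtU u s) : Int))) := by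
  induction s generalizing u d with
  | nil => simp [pvExtU]
  | cons kv t ih =>
    simp only [List.map_cons, List.nodup_cons] at hk
    obtain ⟨hk1, hk2⟩ := hk
    have hdkv : d.contains kv.1 = false := hd kv (by simp)
    simp only [List.foldl_cons]
    cases hidx : PySem.List.index? u kv.2 with
    | some i =>
      rw [PySem.List.index?_eq_idxOf?] at hidx
      have hmem : kv.2 ∈ u := List.isSome_idxOf?.mp (by rw [hidx]; rfl)
      have hi : List.idxOf kv.2 u = i := by
        rw [List.idxOf_eq_getD_idxOf?, hidx]; rfl
      have hstep : pvStepA (u, d) kv = (u, d.insert kv.1 (i : Int)) := by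
        simp [pvStepA, PySem.List.index?_eq_idxOf?, hidx]
      rw [hstep]
      have hd' : ∀ p ∈ t, (d.insert kv.1 (i : Int)).contains p.1 = false := by
        intro p hp
        rw [PySem.Dict.contains_insert]
        have : p.1 ≠ kv.1 := by
          intro h; exact hk1 (h ▸ (List.mem_map_of_mem hp))
        simp [this, hd p (List.mem_cons_of_mem _ hp)]
      obtain ⟨e1, e2⟩ := ih u (d.insert kv.1 (i : Int)) hk2 hd'
      have hE : pvExtU u (kv :: t) = pvExtU u t := by
        simp [pvExtU, List.foldl_cons, hmem]
      refine ⟨by rw [e1, hE], ?_⟩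
      rw [e2, PySem.Dict.items_insert_of_not_contains _ _ hdkv]
      have hiv : List.idxOf kv.2 (pvExtU u t) = i := by
        rw [pvExtU_idxOf t u hmem, hi]
      simp [hE, hiv]
    | none =>
      rw [PySem.List.index?_eq_idxOf?] at hidx
      have hmem : kv.2 ∉ u := List.idxOf?_eq_none_iff.mp hidx
      have hstep : pvStepA (u, d) kv = (u ++ [kv.2], d.insert kv.1 (PySem.List.len u)) := by
        simp [pvStepA, PySem.List.index?_eq_idxOf?, hidx]
      rw [hstep]
      have hd' : ∀ p ∈ t, (d.insert kv.1 (PySem.List.len u)).contains p.1 = false := by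
        intro p hp
        rw [PySem.Dict.contains_insert]
        have : p.1 ≠ kv.1 := by
          intro h; exact hk1 (h ▸ (List.mem_map_of_mem hp))
        simp [this, hd p (List.mem_cons_of_mem _ hp)]
      obtain ⟨e1, e2⟩ := ih (u ++ [kv.2]) _ hk2 hd'
      have hE : pvExtU u (kv :: t) = pvExtU (u ++ [kv.2]) t := by
        simp [pvExtU, List.foldl_cons, hmem]
      refine ⟨by rw [e1, hE], ?_⟩
      rw [e2, PySem.Dict.items_insert_of_not_contains _ _ hdkv]
      have hidxv : List.idxOf kv.2 (pvExtU (u ++ [kv.2]) t) = u.length := by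
        rw [pvExtU_idxOf t _ (by simp), List.idxOf_append]
        simp [hmem]
      simp [hE, hidxv, PySem.List.len_eq]

lemma pvExtU_eq_ofList (s : List (String × Int)) :
    pvExtU [] s = PySem.Set.ofList (s.map (fun kv => kv.2)) := by
  have h : pvExtU [] s = List.foldl PySem.Set.add [] (s.map (fun kv => kv.2)) := by
    rw [List.foldl_map]
    have : PySem.Set.add (α := Int) = fun u v => if v ∈ u then u else u ++ [v] := by
      funext u v
      simp [PySem.Set.add, PySem.Set.contains]
    rw [this]
    rfl
  rw [h, PySem.Set.ofList_eq_foldl]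

-- ---- B-side: the minimal key of a value's group ----
def pvMins (s : List (String × Int)) (v : Int) : String :=
  (PySem.List.min? ((s.filter (fun kv => kv.2 == v)).map Prod.fst) (fun k => k)).getD ""

-- the min of a nonempty list is invariant under permutation
lemma pvMin_perm (K K' : List String) (h : K.Perm K') :
    (PySem.List.min? K (fun k => k)).getD "" = (PySem.List.min? K' (fun k => k)).getD "" := by
  cases hm : PySem.List.min? K (fun k => k) with
  | none =>
    have hK : K = [] := (PySem.List.min?_eq_none_iff K _).mp hm
    have hK' : K' = [] := (hK ▸ h).symm.eq_nil
    simp [hK', PySem.List.min?]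
  | some m =>
    cases hm' : PySem.List.min? K' (fun k => k) with
    | none =>
      have hK' : K' = [] := (PySem.List.min?_eq_none_iff K' _).mp hm'
      have hK : K = [] := (hK' ▸ h).eq_nil
      simp [hK, PySem.List.min?] at hm
    | some m' =>
      have h1 : m ≤ m' := PySem.List.min?_isMin hm m' (h.symm.mem_iff.mp (PySem.List.min?_mem hm'))
      have h2 : m' ≤ m := PySem.List.min?_isMin hm' m (h.mem_iff.mp (PySem.List.min?_mem hm))
      simp [le_antisymm h1 h2]

lemma pvMins_mem (s : List (String × Int)) (v : Int) (hv : v ∈ s.map (fun kv => kv.2)) :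
    pvMins s v ∈ s.map Prod.fst := by
  obtain ⟨kv, hkv, hv2⟩ := List.mem_map.mp hv
  have hne : (s.filter (fun kv => kv.2 == v)).map Prod.fst ≠ [] := by
    have : kv ∈ s.filter (fun kv => kv.2 == v) := List.mem_filter.mpr ⟨hkv, by simp [hv2]⟩
    simp only [ne_eq, List.map_eq_nil_iff]
    exact List.ne_nil_of_mem this
  cases hm : PySem.List.min? ((s.filter (fun kv => kv.2 == v)).map Prod.fst) (fun k => k) with
  | none => exact absurd ((PySem.List.min?_eq_none_iff _ _).mp hm) hne
  | some m =>
    have hmem := PySem.List.min?_mem hm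
    obtain ⟨p, hp, hp1⟩ := List.mem_map.mp hmem
    simp only [pvMins, hm, Option.getD_some]
    exact List.mem_map.mpr ⟨p, (List.mem_filter.mp hp).1, hp1⟩

-- appending a pair whose key dominates every key of s leaves old groups' minima unchanged
lemma pvMins_append_ne (s : List (String × Int)) (a : String × Int) (v : Int) (hne : a.2 ≠ v) :
    pvMins (s ++ [a]) v = pvMins s v := by
  simp [pvMins, List.filter_append, hne]

lemma pvMin_append_big (x : String) (t : List String) (y : String)
    (hle : ∀ k ∈ x :: t, k ≤ y) :
    PySem.List.min? ((x :: t) ++ [y]) (fun k => k) = PySem.List.min? (x :: t) (fun k => k) := by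
  rw [List.cons_append, PySem.List.min?_id_cons, PySem.List.min?_id_cons]
  have h1 : List.foldl min x (t ++ [y]) = min (List.foldl min x t) y := by
    simp [List.foldl_append]
  have h2 : List.foldl min x t ≤ y := by
    rcases PySem.List.foldl_min_mem t x with h | h
    · rw [h]; exact hle x (by simp)
    · exact hle _ (by simp [h])
  rw [h1, min_eq_left h2]

lemma pvMins_append_old (s : List (String × Int)) (a : String × Int)
    (hbig : ∀ p ∈ s, p.1 < a.1) (v : Int) (hv : v ∈ s.map (fun kv => kv.2)) :
    pvMins (s ++ [a]) v = pvMins s v := by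
  by_cases hne : a.2 = v
  · obtain ⟨kv, hkv, hv2⟩ := List.mem_map.mp hv
    have hmemf : kv ∈ s.filter (fun kv => kv.2 == v) := List.mem_filter.mpr ⟨hkv, by simp [hv2]⟩
    have hmne : (s.filter (fun kv => kv.2 == v)).map Prod.fst ≠ [] := by
      simp only [ne_eq, List.map_eq_nil_iff]
      exact List.ne_nil_of_mem hmemf
    obtain ⟨x, t, hxt⟩ := List.exists_cons_of_ne_nil hmne
    have hfa : (s ++ [a]).filter (fun kv => kv.2 == v) = s.filter (fun kv => kv.2 == v) ++ [a] := by
      simp [List.filter_append, hne]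
    have hle : ∀ k ∈ x :: t, k ≤ a.1 := by
      intro k hk
      rw [← hxt] at hk
      obtain ⟨p, hp, hp1⟩ := List.mem_map.mp hk
      exact le_of_lt (hp1 ▸ hbig p (List.mem_filter.mp hp).1)
    have hbg := pvMin_append_big x t a.1 hle
    simp only [List.cons_append] at hbg
    simp only [pvMins, hfa, List.map_append, List.map_cons, List.map_nil, hxt,
      List.cons_append] at *
    rw [hbg]
  · exact pvMins_append_ne s a v hne

lemma pvMins_append_new (s : List (String × Int)) (a : String × Int)
    (hv : a.2 ∉ s.map (fun kv => kv.2)) :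
    pvMins (s ++ [a]) a.2 = a.1 := by
  have hf : s.filter (fun kv => kv.2 == a.2) = [] := by
    rw [List.filter_eq_nil_iff]
    intro p hp hpv
    exact hv (List.mem_map.mpr ⟨p, hp, by simpa using hpv⟩)
  simp [pvMins, List.filter_append, hf, PySem.List.min?]

-- on a list with strictly increasing keys, group minima increase along first appearances
lemma pvPW (s : List (String × Int)) (h : s.Pairwise (fun a b => a.1 < b.1)) :
    (PySem.Set.ofList (s.map (fun kv => kv.2))).Pairwise
      (fun v w => pvMins s v < pvMins s w) := by
  induction s using List.reverseRecOn with
  | nil => simp [PySem.Set.ofList]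
  | append_singleton r a ih =>
    rw [List.pairwise_append] at h
    obtain ⟨hr, -, hbig'⟩ := h
    have hbig : ∀ p ∈ r, p.1 < a.1 := fun p hp => hbig' p hp a (by simp)
    have hofl : PySem.Set.ofList ((r ++ [a]).map (fun kv => kv.2))
        = PySem.Set.add (PySem.Set.ofList (r.map (fun kv => kv.2))) a.2 := by
      simp [PySem.Set.ofList_eq_foldl, List.foldl_append]
    have hEpw : (PySem.Set.ofList (r.map (fun kv => kv.2))).Pairwise
        (fun v w => pvMins (r ++ [a]) v < pvMins (r ++ [a]) w) := by
      refine (ih hr).imp_of_mem (fun {v} {w} hv hw hlt => ?_)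
      rw [pvMins_append_old r a hbig v ((PySem.Set.mem_ofList _ _).mp hv),
          pvMins_append_old r a hbig w ((PySem.Set.mem_ofList _ _).mp hw)]
      exact hlt
    rw [hofl]
    by_cases hmem : a.2 ∈ r.map (fun kv => kv.2)
    · have : PySem.Set.add (PySem.Set.ofList (r.map (fun kv => kv.2))) a.2
          = PySem.Set.ofList (r.map (fun kv => kv.2)) := by
        simp [PySem.Set.add, PySem.Set.contains,
          (PySem.Set.mem_ofList (r.map (fun kv => kv.2)) a.2).mpr hmem]
      rw [this]; exact hEpw
    · have : PySem.Set.add (PySem.Set.ofList (r.map (fun kv => kv.2))) a.2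
          = PySem.Set.ofList (r.map (fun kv => kv.2)) ++ [a.2] := by
        have hnm : a.2 ∉ PySem.Set.ofList (r.map (fun kv => kv.2)) := by
          rw [PySem.Set.mem_ofList]; exact hmem
        simp [PySem.Set.add, PySem.Set.contains, hnm]
      rw [this, List.pairwise_append]
      refine ⟨hEpw, by simp, ?_⟩
      intro v hv b hb
      rw [List.mem_singleton] at hb
      subst hb
      have hv' : v ∈ r.map (fun kv => kv.2) := (PySem.Set.mem_ofList _ _).mp hv
      rw [pvMins_append_old r a hbig v hv', pvMins_append_new r a hmem]
      obtain ⟨p, hp, hp1⟩ := List.mem_map.mp (pvMins_mem r v hv')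
      exact hp1 ▸ hbig p hp

-- the rank dictionary looks up the position in uniq
lemma pvRank_getD (U : List Int) (hU : U.Nodup) {v : Int} (hv : v ∈ U) :
    ((PySem.List.enumerate U).foldl
      (fun (d : PySem.Dict Int Int) uv => d.insert uv.2 uv.1) PySem.Dict.empty).getD v 0
      = (List.idxOf v U : Int) := by
  have hitems : ((PySem.List.enumerate U).foldl
      (fun (d : PySem.Dict Int Int) uv => d.insert uv.2 uv.1) PySem.Dict.empty).items
      = (PySem.List.enumerate U).map (fun uv => (uv.2, uv.1)) := by
    have := PySem.Dict.items_foldl_insert_fresh (PySem.List.enumerate U)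
      (fun uv => uv.2) (fun uv => uv.1) PySem.Dict.empty
      (by intro a _; simp [PySem.Dict.contains_empty])
      (by rw [PySem.List.map_snd_enumerate]; exact hU)
    simpa using this
  have hkeys : ((PySem.List.enumerate U).foldl
      (fun (d : PySem.Dict Int Int) uv => d.insert uv.2 uv.1) PySem.Dict.empty).keys.Nodup := by
    simp only [PySem.Dict.keys, hitems, List.map_map]
    have : ((fun (p : Int × Int) => p.1) ∘ fun uv => (uv.2, uv.1)) = fun (uv : Int × Int) => uv.2 := rfl
    rw [this, PySem.List.map_snd_enumerate]
    exact hU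
  have hlt : List.idxOf v U < U.length := List.idxOf_lt_length_of_mem hv
  have hmem : (v, (List.idxOf v U : Int)) ∈ ((PySem.List.enumerate U).foldl
      (fun (d : PySem.Dict Int Int) uv => d.insert uv.2 uv.1) PySem.Dict.empty).items := by
    rw [hitems]
    refine List.mem_map.mpr ⟨((List.idxOf v U : Int), v), ?_, rfl⟩
    rw [PySem.List.mem_enumerate_iff]
    exact ⟨List.idxOf v U, hlt, by simp [List.getElem_idxOf hlt]⟩
  exact PySem.Dict.getD_of_mem_items _ hmem hkeys 0

-- ===== VERDICT (by name: the statement is the Claim_ definition above) =====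
theorem indexed_py_spec : Claim_equal_indexed_py := by
  intro values _hdom hpre
  unfold Spec_indexed_py indexed_py indexed_py_alt
  dsimp only
  rw [pvSorted2_eq values hpre]
  set s := PySem.List.sorted values (fun kv => kv.1) with hs
  have hperm : s.Perm values := PySem.List.sorted_perm values (fun kv => kv.1) false
  have hkeys : (s.map Prod.fst).Nodup := (hperm.map Prod.fst).nodup_iff.mpr hpre
  have hstrict : s.Pairwise (fun a b => a.1 < b.1) := pvSortedStrict values hpre
  -- A's loop
  obtain ⟨e1, e2⟩ := pvFoldA s [] PySem.Dict.empty hkeys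
    (by intro kv _; simp [PySem.Dict.contains_empty])
  have hU : pvExtU [] s = PySem.Set.ofList (s.map (fun kv => kv.2)) := pvExtU_eq_ofList s
  set U := PySem.Set.ofList (s.map (fun kv => kv.2)) with hUdef
  have hUnodup : U.Nodup := PySem.Set.nodup_ofList _
  -- B's groups dictionary
  set groups := values.foldl
    (fun (d : PySem.Dict Int (List String)) kv => d.modify kv.2 [] (fun ks => ks ++ [kv.1]))
    PySem.Dict.empty with hgroups
  have hgkeys : groups.keys = PySem.Set.ofList (values.map (fun kv => kv.2)) := by
    rw [hgroups, PySem.Dict.keys_foldl_modify_key values (fun kv => kv.2) []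
      (fun _ kv => (fun ks => ks ++ [kv.1])) PySem.Dict.empty]
    simp [PySem.Set.update, PySem.Set.ofList_eq_foldl, PySem.Dict.keys_empty]
  have hgD : ∀ v : Int, groups.getD v [] = (values.filter (fun kv => kv.2 == v)).map Prod.fst := by
    intro v
    have hmapped : groups = (values.map (fun kv => (kv.2, kv.1))).foldl
        (fun (d : PySem.Dict Int (List String)) p => d.modify p.1 [] (fun ks => ks ++ [p.2]))
        PySem.Dict.empty := by
      rw [hgroups, List.foldl_map]
    rw [hmapped, PySem.Dict.getD_foldl_modify_append]
    simp [List.filter_map, List.map_map, Function.comp_def]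
  -- B's key function agrees with the group minima over s
  have hfun : ∀ v : Int,
      (PySem.List.min? (groups.getD v []) (fun k => k)).getD "" = pvMins s v := by
    intro v
    rw [hgD v]
    exact pvMin_perm _ _ (((hperm.symm).filter _).map Prod.fst)
  -- B's uniq equals A's uniq
  have hpermU : U.Perm groups.keys := by
    rw [hgkeys]
    refine (List.perm_ext_iff_of_nodup hUnodup (PySem.Set.nodup_ofList _)).mpr (fun v => ?_)
    rw [hUdef, PySem.Set.mem_ofList, PySem.Set.mem_ofList]
    exact (hperm.map (fun kv => kv.2)).mem_iff
  have huniq : PySem.List.sorted groups.keys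
      (fun v => (PySem.List.min? (groups.getD v []) (fun k => k)).getD "") = U := by
    refine PySem.List.sorted_eq_of_perm_of_pairwise_lt groups.keys U _ hpermU ?_
    refine (pvPW s hstrict).imp (fun {v} {w} h => ?_)
    rw [hfun v, hfun w]
    exact h
  rw [huniq]
  -- B's key lookup dictionary
  have hdvitems : (PySem.Dict.ofList values).items = values := by
    have := PySem.Dict.items_foldl_insert_fresh values Prod.fst Prod.snd PySem.Dict.empty
      (by intro a _; simp [PySem.Dict.contains_empty]) hpre
    simpa [PySem.Dict.ofList, PySem.Dict.update] using this
  have hdv : ∀ kv ∈ s, (PySem.Dict.ofList values).getD kv.1 0 = kv.2 := by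
    intro kv hkv
    have hmem : (kv.1, kv.2) ∈ (PySem.Dict.ofList values).items := by
      rw [hdvitems]; simpa using hperm.mem_iff.mp hkv
    have hknd : (PySem.Dict.ofList values).keys.Nodup := by
      simp only [PySem.Dict.keys, hdvitems]; exact hpre
    exact PySem.Dict.getD_of_mem_items _ hmem hknd 0
  -- the sorted key list is the key column of the sorted item list
  have hskeys : PySem.List.sorted (values.map Prod.fst) (fun k => k) = s.map Prod.fst := by
    refine PySem.List.sorted_eq_of_perm_of_pairwise_lt _ _ _ (hperm.map Prod.fst) ?_
    exact List.pairwise_map.mpr hstrict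
  rw [hskeys]
  -- B's index dictionary
  have hidxitems : ((s.map Prod.fst).foldl
      (fun (d : PySem.Dict String Int) k => d.insert k
        (((PySem.List.enumerate U).foldl
            (fun (d : PySem.Dict Int Int) uv => d.insert uv.2 uv.1) PySem.Dict.empty).getD
          ((PySem.Dict.ofList values).getD k 0) 0)) PySem.Dict.empty).items
      = (s.map Prod.fst).map (fun k => (k,
          ((PySem.List.enumerate U).foldl
            (fun (d : PySem.Dict Int Int) uv => d.insert uv.2 uv.1) PySem.Dict.empty).getD
          ((PySem.Dict.ofList values).getD k 0) 0)) := by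
    have := PySem.Dict.items_foldl_insert_fresh (s.map Prod.fst) (fun k => k)
      (fun k => ((PySem.List.enumerate U).foldl
          (fun (d : PySem.Dict Int Int) uv => d.insert uv.2 uv.1) PySem.Dict.empty).getD
        ((PySem.Dict.ofList values).getD k 0) 0) PySem.Dict.empty
      (by intro a _; simp [PySem.Dict.contains_empty]) (by simpa using hkeys)
    simpa using this
  refine Prod.ext ?_ ?_
  · simpa [hU] using e1
  · simp only
    rw [e2, hidxitems]
    have hemp : (PySem.Dict.empty : PySem.Dict String Int).items = [] := rfl
    rw [hemp, List.nil_append, hU, List.map_map]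
    apply List.map_congr_left
    intro kv hkv
    have hvU : kv.2 ∈ U := by
      rw [hUdef, PySem.Set.mem_ofList]
      exact List.mem_map_of_mem hkv
    simp only [Function.comp_def]
    rw [hdv kv hkv, pvRank_getD U hUnodup hvU]
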